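-- pv_equiv track=rewrite | github.com/l2ggy/Somnus | app/agents/intelligence/intervention.py | _pick_type
-- ===== SOURCE A (Python) =====
-- _STIMULATING = {"white_noise", "wake_ramp"}
--
-- def _pick_type(candidates: list[str], phase: str) -> str:
--     """
--     Choose the most appropriate intervention type for the current sleep phase.
--
--     Args:
--         candidates: Ordered list of allowed types (disliked already removed).
--         phase:      Current sleep phase from sleep_state.
--
--     Returns:
--         The chosen intervention type string.
--     """
--     # Deep sleep: avoid stimulating sounds; prefer low-frequency masking.
--     if phase == "deep":
--         for t in candidates:
--             if t not in _STIMULATING and t in ("brown_noise", "pink_noise"):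
--                 return t
--         # Accept any non-stimulating type.
--         for t in candidates:
--             if t not in _STIMULATING:
--                 return t
--
--     # REM: breathing_pace first, then gentle masking.
--     if phase == "rem":
--         for t in candidates:
--             if t == "breathing_pace":
--                 return t
--         for t in candidates:
--             if t not in _STIMULATING:
--                 return t
--
--     # Light / awake / unknown: first non-stimulating candidate is fine.
--     for t in candidates:
--         if t not in _STIMULATING:
--             return t
--
--     # If everything left is stimulating, return the first candidate anyway.
--     return candidates[0]
-- ===== SOURCE B (Python) =====
-- _STIMULATING = {"white_noise", "wake_ramp"}
--
-- def _pick_type(candidates: list[str], phase: str) -> str: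
--     if phase == "deep":
--         def key(t):
--             if t in ("brown_noise", "pink_noise"):
--                 return 0
--             return 2 if t in _STIMULATING else 1
--     elif phase == "rem":
--         def key(t):
--             if t == "breathing_pace":
--                 return 0
--             return 2 if t in _STIMULATING else 1
--     else:
--         def key(t):
--             return 1 if t in _STIMULATING else 0
--     return min(candidates, key=key)
-- ===== Notes on version B (the rewrite author's own statement) =====
-- stated objective: idiomatic
-- what changed: Replaces the layered sequence of up-to-three scanning loops with a single phase-dependent priority key and one min(candidates, key=key) pass, relying on min's first-minimum tie-breaking to reproduce list-order preference and the all-stimulating fallback.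
import Mathlib
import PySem

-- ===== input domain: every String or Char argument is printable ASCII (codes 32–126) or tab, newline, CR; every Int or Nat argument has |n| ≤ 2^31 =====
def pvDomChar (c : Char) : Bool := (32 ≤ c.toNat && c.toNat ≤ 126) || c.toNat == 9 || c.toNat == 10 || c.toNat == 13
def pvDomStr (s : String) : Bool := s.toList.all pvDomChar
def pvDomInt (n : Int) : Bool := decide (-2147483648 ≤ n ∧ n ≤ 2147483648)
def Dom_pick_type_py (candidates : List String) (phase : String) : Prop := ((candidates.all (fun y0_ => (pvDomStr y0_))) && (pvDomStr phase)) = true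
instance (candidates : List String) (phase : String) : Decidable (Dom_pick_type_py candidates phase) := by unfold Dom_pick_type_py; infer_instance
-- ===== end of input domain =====

-- B replaces A's layered sequence of scanning loops by a single phase-dependent
-- priority key and one min-by-key pass (idiomatic; same asymptotic cost).

-- membership in the Python set _STIMULATING = {"white_noise", "wake_ramp"}
def pvStim (t : String) : Bool := t == "white_noise" || t == "wake_ramp"

-- ===== PORT A =====
-- Each Python for-loop with an early return is `List.find?` over the same list
-- with the loop's test; falling through a block is the `none` branch.
def pick_type_py (candidates : List String) (phase : String) : String :=
  let deepRes : Option String :=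
    if phase == "deep" then
      match candidates.find? (fun t => !pvStim t && (t == "brown_noise" || t == "pink_noise")) with
      | some t => some t
      | none => candidates.find? (fun t => !pvStim t)
    else none
  match deepRes with
  | some t => t
  | none =>
    let remRes : Option String :=
      if phase == "rem" then
        match candidates.find? (fun t => t == "breathing_pace") with
        | some t => some t
        | none => candidates.find? (fun t => !pvStim t)
      else none
    match remRes with
    | some t => t
    | none =>
      match candidates.find? (fun t => !pvStim t) with
      | some t => t
      | none => candidates.headD ""   -- candidates[0]; IndexError on [] is excluded by Pre_

-- ===== PORT B =====
def pick_type_py_alt (candidates : List String) (phase : String) : String :=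
  let key : String → Nat :=
    if phase == "deep" then
      fun t => if t == "brown_noise" || t == "pink_noise" then 0 else if pvStim t then 2 else 1
    else if phase == "rem" then
      fun t => if t == "breathing_pace" then 0 else if pvStim t then 2 else 1
    else
      fun t => if pvStim t then 1 else 0
  match candidates with
  | [] => ""   -- Python min raises ValueError on []; excluded by Pre_
  | h :: t => t.foldl (fun best x => if key x < key best then x else best) h

-- ===== PRECONDITION & SPEC =====
-- A raises IndexError (and B's min raises ValueError) on an empty candidate list.
def Pre_pick_type_py (candidates : List String) (phase : String) : Prop := candidates ≠ []
instance (candidates : List String) (phase : String) : Decidable (Pre_pick_type_py candidates phase) := by unfold Pre_pick_type_py; infer_instance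
def pvWitness_pick_type_py : List String × String := (["white_noise", "pink_noise"], "deep")

def Spec_pick_type_py (candidates : List String) (phase : String) (out : String) : Prop := out = pick_type_py_alt candidates phase
instance (candidates : List String) (phase : String) (out : String) : Decidable (Spec_pick_type_py candidates phase out) := by unfold Spec_pick_type_py; infer_instance

-- ===== CLAIM (what is proved, stated in full; the proofs are below) =====
def Claim_equal_pick_type_py : Prop := ∀ (candidates : List String) (phase : String), Dom_pick_type_py candidates phase → Pre_pick_type_py candidates phase → Spec_pick_type_py candidates phase (pick_type_py candidates phase)

-- ===== LEMMAS AND PROOFS =====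

-- first element of cs whose key is 0, else first whose key is ≤ 1, else the head
def pvLayered (k : String → Nat) (cs : List String) : String :=
  match cs.find? (fun x => k x == 0) with
  | some y => y
  | none =>
    match cs.find? (fun x => decide (k x ≤ 1)) with
    | some y => y
    | none => cs.headD ""

-- the min-by-key fold computes the layered search when all keys are ≤ 2
lemma fmin_layer (k : String → Nat) (hk : ∀ x, k x ≤ 2) :
    ∀ (t : List String) (h : String),
      List.foldl (fun best x => if k x < k best then x else best) h t = pvLayered k (h :: t) := by
  intro t
  induction t with
  | nil =>
    intro h
    by_cases h0 : k h = 0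
    · simp [pvLayered, List.find?, h0]
    · have h0' : (k h == 0) = false := by simp [h0]
      by_cases h1 : k h ≤ 1 <;> simp [pvLayered, List.find?, h0', h1]
  | cons x t' ih =>
    intro h
    simp only [List.foldl]
    rw [ih]
    have hkh := hk h
    have hkx := hk x
    by_cases hlt : k x < k h
    · simp only [if_pos hlt]
      have hh0 : (k h == 0) = false := by simp; omega
      have hx1 : decide (k x ≤ 1) = true := by simp; omega
      by_cases hx0 : k x = 0
      · simp [pvLayered, List.find?, hh0, hx0]
      · have hx0' : (k x == 0) = false := by simp [hx0]
        by_cases h1 : k h = 1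
        · omega
        · have hh1 : decide (k h ≤ 1) = false := by simp; omega
          simp only [pvLayered, List.find?, hh0, hx0', hx1, hh1]
    · simp only [if_neg hlt]
      by_cases hh0 : k h = 0
      · simp [pvLayered, List.find?, hh0]
      · have hx0 : (k x == 0) = false := by simp; omega
        have hh0' : (k h == 0) = false := by simp [hh0]
        by_cases hh1 : k h ≤ 1
        · have hd1 : decide (k h ≤ 1) = true := by simp [hh1]
          simp only [pvLayered, List.find?, hh0', hx0, hd1]
        · have hd1h : decide (k h ≤ 1) = false := by simp; omega
          have hd1x : decide (k x ≤ 1) = false := by simp; omega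
          simp only [pvLayered, List.find?, hh0', hx0, hd1h, hd1x]
          cases hf : List.find? (fun x => k x == 0) t' <;>
            cases hg : List.find? (fun x => decide (k x ≤ 1)) t' <;> simp [hf, hg]

lemma kdeep_le (x : String) :
    ((if x == "brown_noise" || x == "pink_noise" then 0 else if pvStim x then 2 else 1) : Nat) ≤ 2 := by
  split
  · omega
  · split <;> omega

lemma krem_le (x : String) :
    ((if x == "breathing_pace" then 0 else if pvStim x then 2 else 1) : Nat) ≤ 2 := by
  split
  · omega
  · split <;> omega

lemma kother_le (x : String) : ((if pvStim x then 1 else 0) : Nat) ≤ 2 := by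
  split <;> omega

lemma pred_deep0 :
    (fun t => !pvStim t && (t == "brown_noise" || t == "pink_noise"))
      = (fun t => ((if t == "brown_noise" || t == "pink_noise" then 0 else if pvStim t then 2 else 1) : Nat) == 0) := by
  funext t
  by_cases hb : t = "brown_noise" ∨ t = "pink_noise"
  · rcases hb with rfl | rfl <;> rfl
  · push_neg at hb
    have h1 : (t == "brown_noise") = false := by simp [hb.1]
    have h2 : (t == "pink_noise") = false := by simp [hb.2]
    cases hs : pvStim t <;> simp [h1, h2, hs]

lemma pred_deep1 :
    (fun t => !pvStim t)
      = (fun t => decide (((if t == "brown_noise" || t == "pink_noise" then 0 else if pvStim t then 2 else 1) : Nat) ≤ 1)) := by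
  funext t
  by_cases hb : t = "brown_noise" ∨ t = "pink_noise"
  · rcases hb with rfl | rfl <;> rfl
  · push_neg at hb
    have h1 : (t == "brown_noise") = false := by simp [hb.1]
    have h2 : (t == "pink_noise") = false := by simp [hb.2]
    cases hs : pvStim t <;> simp [h1, h2, hs]

lemma pred_rem0 :
    (fun t : String => t == "breathing_pace")
      = (fun t => ((if t == "breathing_pace" then 0 else if pvStim t then 2 else 1) : Nat) == 0) := by
  funext t
  by_cases hb : t = "breathing_pace"
  · subst hb; rfl
  · have h1 : (t == "breathing_pace") = false := by simp [hb]
    cases hs : pvStim t <;> simp [h1, hs]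

lemma pred_rem1 :
    (fun t => !pvStim t)
      = (fun t => decide (((if t == "breathing_pace" then 0 else if pvStim t then 2 else 1) : Nat) ≤ 1)) := by
  funext t
  by_cases hb : t = "breathing_pace"
  · subst hb; rfl
  · have h1 : (t == "breathing_pace") = false := by simp [hb]
    cases hs : pvStim t <;> simp [h1, hs]

lemma pred_other0 :
    (fun t => !pvStim t)
      = (fun t => ((if pvStim t then 1 else 0) : Nat) == 0) := by
  funext t
  cases hs : pvStim t <;> simp [hs]

-- ===== VERDICT (by name: the statement is the Claim_ definition above) =====
theorem pick_type_py_spec : Claim_equal_pick_type_py := by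
  intro candidates phase _ hpre
  unfold Spec_pick_type_py pick_type_py pick_type_py_alt
  obtain ⟨h, t, rfl⟩ : ∃ h t, candidates = h :: t := by
    cases candidates with
    | nil => exact absurd rfl hpre
    | cons h t => exact ⟨h, t, rfl⟩
  by_cases hd : phase = "deep"
  · subst hd
    simp only [String.reduceBEq, Bool.false_eq_true, reduceIte]
    rw [fmin_layer _ kdeep_le]
    rw [pred_deep0, pred_deep1, pvLayered]
    cases hf0 : List.find? (fun t => ((if t == "brown_noise" || t == "pink_noise" then 0 else if pvStim t then 2 else 1) : Nat) == 0) (h :: t) with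
    | some y => simp [hf0]
    | none =>
      cases hf1 : List.find? (fun t => decide (((if t == "brown_noise" || t == "pink_noise" then 0 else if pvStim t then 2 else 1) : Nat) ≤ 1)) (h :: t) with
      | some y => simp [hf0, hf1]
      | none => simp [hf0, hf1]
  · by_cases hr : phase = "rem"
    · subst hr
      simp only [String.reduceBEq, Bool.false_eq_true, reduceIte]
      rw [fmin_layer _ krem_le]
      rw [pred_rem0, pred_rem1, pvLayered]
      cases hf0 : List.find? (fun t => ((if t == "breathing_pace" then 0 else if pvStim t then 2 else 1) : Nat) == 0) (h :: t) with
      | some y => simp [hf0]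
      | none =>
        cases hf1 : List.find? (fun t => decide (((if t == "breathing_pace" then 0 else if pvStim t then 2 else 1) : Nat) ≤ 1)) (h :: t) with
        | some y => simp [hf0, hf1]
        | none => simp [hf0, hf1]
    · have hd' : (phase == "deep") = false := by simp [hd]
      have hr' : (phase == "rem") = false := by simp [hr]
      simp only [hd', hr', Bool.false_eq_true, if_neg, not_false_iff]
      rw [fmin_layer _ kother_le]
      rw [pred_other0, pvLayered]
      cases hf0 : List.find? (fun t => ((if pvStim t then 1 else 0) : Nat) == 0) (h :: t) with
      | some y => simp [hf0]
      | none =>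
        simp only [hf0, List.find?]
        cases hs : pvStim h <;> simp [hs]
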